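-- pv_equiv track=rewrite | github.com/amansrivastava17/bns-short-text-similarity | bns.py | get_word_count_in_category
-- ===== SOURCE A (Python) =====
-- def get_word_count_in_category(documents, categories):
--     """
--     Create dict containing count of word for every category from document.
--         Examples:
--             documents - ['book cab', 'book me a taxi', 'book flight to mumbai']
--             categories - ['book_cab', 'book_cab', 'book_flight']
--
--             word_dict => {'book': {'book_cab': 2 , book_flight: 1}, 'cab': {'book_cab': 1},
--                           'me': {'book_cab': 1}, 'a': {'book_cab':1 }, 'flight': {'book_flight': 1},
--                           'to': {book_flight: 1}, 'mumbai': {'book_flight': 1}}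
--     Args:
--         documents (list): list of documents
--         categories (list): list of category for doc in documents
--
--     Returns:
--         word_dict (dict):  dict of word and their count in respective categories
--     """
--     word_dict = {}
--     for sent, cat in zip(documents, categories):
--         words = sent.split()
--         for word in words:
--             if word not in word_dict:
--                 word_dict[word] = {cat: 1}
--             else:
--                 if cat not in word_dict[word]:
--                     word_dict[word][cat] = 1
--                 else:
--                     word_dict[word][cat] += 1
--     return word_dict
-- ===== SOURCE B (Python) =====
-- def get_word_count_in_category(documents, categories):
--     pairs = [(w, cat) for sent, cat in zip(documents, categories) for w in sent.split()]
--     words = list(dict.fromkeys(w for w, _ in pairs))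
--     return {w: {c: pairs.count((w, c))
--                 for c in dict.fromkeys(c for w2, c in pairs if w2 == w)}
--             for w in words}
-- ===== Notes on version B (the rewrite author's own statement) =====
-- stated objective: alternative
-- what changed: Replaces A's incremental nested-dict mutation with a flat (word,category) pair list that is deduplicated (dict.fromkeys preserves first-occurrence order) and counted per pair via pairs.count in a nested comprehension.
import Mathlib
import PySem

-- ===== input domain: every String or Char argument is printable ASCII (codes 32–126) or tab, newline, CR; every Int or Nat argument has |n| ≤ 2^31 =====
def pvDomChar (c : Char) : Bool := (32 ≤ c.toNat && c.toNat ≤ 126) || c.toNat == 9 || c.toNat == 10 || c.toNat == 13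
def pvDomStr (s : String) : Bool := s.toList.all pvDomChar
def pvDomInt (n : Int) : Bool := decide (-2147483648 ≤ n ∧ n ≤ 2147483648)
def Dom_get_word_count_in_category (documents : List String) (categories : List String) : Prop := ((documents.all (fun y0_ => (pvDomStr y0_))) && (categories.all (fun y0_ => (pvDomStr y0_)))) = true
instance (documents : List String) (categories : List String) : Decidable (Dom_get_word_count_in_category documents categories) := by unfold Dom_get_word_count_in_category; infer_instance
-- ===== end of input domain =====

-- B replaces A's incremental nested-dict mutation by a flat (word,category) pair list,
-- deduplication in first-occurrence order, and a per-pair count (alternative decomposition, not faster).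


-- ===== PORT A =====
-- one iteration of A's inner loop body (the three branches of A, in order)
def aStep (d : PySem.Dict String (PySem.Dict String Int)) (w c : String) :
    PySem.Dict String (PySem.Dict String Int) :=
  match d.get? w with
  | none => d.insert w (PySem.Dict.empty.insert c 1)
  | some m =>
    match m.get? c with
    | none => d.insert w (m.insert c 1)
    | some n => d.insert w (m.insert c (n + 1))

def get_word_count_in_category (documents : List String) (categories : List String) :
    List (String × List (String × Int)) :=
  (((documents.zip categories).foldl
      (fun d sc => (PySem.Str.split₀ sc.1).foldl (fun d w => aStep d w sc.2) d)
      PySem.Dict.empty).items).map (fun p => (p.1, p.2.items))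

-- ===== PORT B =====
def get_word_count_in_category_alt (documents : List String) (categories : List String) :
    List (String × List (String × Int)) :=
  let pairs := (documents.zip categories).flatMap
      (fun sc => (PySem.Str.split₀ sc.1).map (fun w => (w, sc.2)))
  let words := PySem.List.dedup (pairs.map (fun p => p.1))
  words.map (fun w => (w,
    (PySem.List.dedup ((pairs.filter (fun q => q.1 == w)).map (fun q => q.2))).map
      (fun c => (c, (pairs.count (w, c) : Int)))))

-- ===== PRECONDITION & SPEC =====
def Spec_get_word_count_in_category (documents : List String) (categories : List String) (out : List (String × List (String × Int))) : Prop := out = get_word_count_in_category_alt documents categories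
instance (documents : List String) (categories : List String) (out : List (String × List (String × Int))) : Decidable (Spec_get_word_count_in_category documents categories out) := by unfold Spec_get_word_count_in_category; infer_instance

-- ===== CLAIM (what is proved, stated in full; the proofs are below) =====
def Claim_equal_get_word_count_in_category : Prop := ∀ (documents : List String) (categories : List String), Dom_get_word_count_in_category documents categories → Spec_get_word_count_in_category documents categories (get_word_count_in_category documents categories)

-- ===== LEMMAS AND PROOFS =====

-- the closed-form nested dict B computes, expressed over the flat pair list
def innerOf (ps : List (String × String)) (w : String) : PySem.Dict String Int :=
  PySem.Dict.mk ((PySem.Set.ofList ((ps.filter (fun q => q.1 == w)).map (fun q => q.2))).map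
    (fun c => (c, (ps.count (w, c) : Int))))

def nestOf (ps : List (String × String)) : PySem.Dict String (PySem.Dict String Int) :=
  PySem.Dict.mk ((PySem.Set.ofList (ps.map (fun p => p.1))).map (fun w => (w, innerOf ps w)))

theorem foldl_flatMap {α β γ : Type} (l : List α) (f : α → List β) (g : γ → β → γ) (init : γ) :
    (l.flatMap f).foldl g init = l.foldl (fun acc x => (f x).foldl g acc) init := by
  induction l generalizing init with
  | nil => rfl
  | cons a t ih => simp [List.flatMap_cons, List.foldl_append, ih]

theorem get?_mk_map {β : Type} (l : List String) (f : String → β) (hl : l.Nodup) (x : String) :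
    (PySem.Dict.mk (l.map (fun a => (a, f a)))).get? x = if x ∈ l then some (f x) else none := by
  induction l with
  | nil => rfl
  | cons a t ih =>
    simp only [List.map_cons, PySem.Dict.get?_mk_cons]
    rcases List.nodup_cons.mp hl with ⟨ha, ht⟩
    by_cases hx : a = x
    · subst hx; simp
    · simp [hx, Ne.symm hx, ih ht, beq_iff_eq]

theorem ofList_append_singleton {α : Type} [BEq α] (xs : List α) (x : α) :
    PySem.Set.ofList (xs ++ [x]) = (PySem.Set.ofList xs).add x := by
  rw [PySem.Set.ofList_append, PySem.Set.update_cons, PySem.Set.update_nil]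

theorem mk_items {κ ν : Type} (l : List (κ × ν)) : (PySem.Dict.mk l).items = l := rfl

theorem set_ofList_nil {α : Type} [BEq α] : PySem.Set.ofList ([] : List α) = [] := rfl

theorem innerOf_items (ps : List (String × String)) (w : String) :
    (innerOf ps w).items =
      (PySem.Set.ofList ((ps.filter (fun q => q.1 == w)).map (fun q => q.2))).map
        (fun c => (c, (ps.count (w, c) : Int))) := rfl

theorem aStep_none {d : PySem.Dict String (PySem.Dict String Int)} {w c : String}
    (h : d.get? w = none) : aStep d w c = d.insert w (PySem.Dict.empty.insert c 1) := by
  simp only [aStep, h]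

theorem aStep_some_none {d : PySem.Dict String (PySem.Dict String Int)} {w c : String}
    {m : PySem.Dict String Int} (h : d.get? w = some m) (h2 : m.get? c = none) :
    aStep d w c = d.insert w (m.insert c 1) := by
  simp only [aStep, h, h2]

theorem aStep_some_some {d : PySem.Dict String (PySem.Dict String Int)} {w c : String}
    {m : PySem.Dict String Int} {n : Int} (h : d.get? w = some m) (h2 : m.get? c = some n) :
    aStep d w c = d.insert w (m.insert c (n + 1)) := by
  simp only [aStep, h, h2]

-- the inner key set of innerOf ps w is exactly the categories paired with w in ps
theorem mem_innerKeys (ps : List (String × String)) (w c : String) :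
    c ∈ PySem.Set.ofList ((ps.filter (fun q => q.1 == w)).map (fun q => q.2)) ↔ (w, c) ∈ ps := by
  rw [PySem.Set.mem_ofList]
  simp only [List.mem_map, List.mem_filter, beq_iff_eq]
  constructor
  · rintro ⟨⟨a, b⟩, ⟨hmem, h1⟩, h2⟩
    simp only at h1 h2; subst h1; subst h2; exact hmem
  · intro h; exact ⟨(w, c), ⟨h, rfl⟩, rfl⟩

theorem nestOf_get? (ps : List (String × String)) (w : String) :
    (nestOf ps).get? w =
      if w ∈ ps.map (fun p => p.1) then some (innerOf ps w) else none := by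
  unfold nestOf
  rw [get?_mk_map _ _ (PySem.Set.nodup_ofList _) w]
  by_cases h : w ∈ ps.map (fun p => p.1) <;>
    simp [h, PySem.Set.mem_ofList]

theorem innerOf_get? (ps : List (String × String)) (w c : String) :
    (innerOf ps w).get? c = if (w, c) ∈ ps then some ((ps.count (w, c) : Int)) else none := by
  unfold innerOf
  rw [get?_mk_map _ _ (PySem.Set.nodup_ofList _) c]
  by_cases h : (w, c) ∈ ps <;> simp [h, mem_innerKeys ps w c]

theorem count_append_ne (ps : List (String × String)) (w0 c0 w c : String)
    (h : ¬ ((w0, c0) = (w, c))) :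
    (ps ++ [(w0, c0)]).count (w, c) = ps.count (w, c) := by
  simp [List.count_append, h]

theorem innerOf_append_ne (ps : List (String × String)) (w0 c0 w : String) (hne : w0 ≠ w) :
    innerOf (ps ++ [(w0, c0)]) w = innerOf ps w := by
  unfold innerOf
  have hfilter : (ps ++ [(w0, c0)]).filter (fun q => q.1 == w) = ps.filter (fun q => q.1 == w) := by
    simp [List.filter_append, hne]
  rw [hfilter]
  apply congrArg
  apply List.map_congr_left
  intro c _
  have : (ps ++ [(w0, c0)]).count (w, c) = ps.count (w, c) :=
    count_append_ne ps w0 c0 w c (by simp [Prod.ext_iff]; intro h; exact absurd h hne)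
  rw [this]

theorem filter_append_self (ps : List (String × String)) (w0 c0 : String) :
    (ps ++ [(w0, c0)]).filter (fun q => q.1 == w0) = ps.filter (fun q => q.1 == w0) ++ [(w0, c0)] := by
  simp [List.filter_append]

theorem count_append_self (ps : List (String × String)) (w0 c0 : String) :
    (ps ++ [(w0, c0)]).count (w0, c0) = ps.count (w0, c0) + 1 := by
  simp [List.count_append]

theorem innerOf_append_self (ps : List (String × String)) (w0 c0 : String) :
    innerOf (ps ++ [(w0, c0)]) w0 =
      PySem.Dict.mk
        (((PySem.Set.ofList ((ps.filter (fun q => q.1 == w0)).map (fun q => q.2))).add c0).map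
          (fun c => (c, ((ps ++ [(w0, c0)]).count (w0, c) : Int)))) := by
  unfold innerOf
  rw [filter_append_self, List.map_append, List.map_cons, List.map_nil, ofList_append_singleton]

theorem set_add_of_mem {α : Type} [BEq α] [LawfulBEq α] (s : PySem.Set α) (x : α) (h : x ∈ s) :
    s.add x = s := by
  simp [PySem.Set.add, PySem.Set.contains, h]

theorem set_add_of_not_mem {α : Type} [BEq α] [LawfulBEq α] (s : PySem.Set α) (x : α) (h : x ∉ s) :
    s.add x = s ++ [x] := by
  simp [PySem.Set.add, PySem.Set.contains, h]

theorem contains_of_get?_none {κ ν : Type} [BEq κ] {d : PySem.Dict κ ν} {k : κ}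
    (h : d.get? k = none) : d.contains k = false := by
  rw [PySem.Dict.contains_eq_isSome_get?, h]; rfl

theorem contains_of_get?_some {κ ν : Type} [BEq κ] {d : PySem.Dict κ ν} {k : κ} {v : ν}
    (h : d.get? k = some v) : d.contains k = true := by
  rw [PySem.Dict.contains_eq_isSome_get?, h]; rfl

theorem char_aStep (ps : List (String × String)) :
    ps.foldl (fun d p => aStep d p.1 p.2) PySem.Dict.empty = nestOf ps := by
  induction ps using List.reverseRecOn with
  | nil => rfl
  | append_singleton ps p ih =>
    obtain ⟨w0, c0⟩ := p
    rw [List.foldl_append, List.foldl_cons, List.foldl_nil, ih]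
    show aStep (nestOf ps) w0 c0 = nestOf (ps ++ [(w0, c0)])
    have hW' : (ps ++ [(w0, c0)]).map (fun p => p.1) = ps.map (fun p => p.1) ++ [w0] := by simp
    by_cases hw : w0 ∈ ps.map (fun p => p.1)
    · -- word already present
      have h1 : (nestOf ps).get? w0 = some (innerOf ps w0) := by rw [nestOf_get?, if_pos hw]
      have hWeq : PySem.Set.ofList ((ps ++ [(w0, c0)]).map (fun p => p.1))
          = PySem.Set.ofList (ps.map (fun p => p.1)) := by
        rw [hW', ofList_append_singleton, set_add_of_mem _ _ ((PySem.Set.mem_ofList _ _).mpr hw)]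
      have houter : ∀ v : PySem.Dict String Int, v = innerOf (ps ++ [(w0, c0)]) w0 →
          (nestOf ps).insert w0 v = nestOf (ps ++ [(w0, c0)]) := by
        intro v hv
        apply PySem.Dict.ext
        rw [PySem.Dict.items_insert_of_contains _ _ (contains_of_get?_some h1)]
        unfold nestOf
        rw [hWeq, mk_items, mk_items, List.map_map]
        apply List.map_congr_left
        intro w hwmem
        by_cases hww : w = w0
        · subst hww
          simp only [Function.comp_apply, beq_self_eq_true, if_pos]
          rw [hv]
        · simp only [Function.comp_apply]
          rw [if_neg (by simp [hww]), innerOf_append_ne ps w0 c0 w (fun h => hww h.symm)]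
      by_cases hc : (w0, c0) ∈ ps
      · -- both word and category present: in-place increment
        have h2 : (innerOf ps w0).get? c0 = some ((ps.count (w0, c0) : Int)) := by
          rw [innerOf_get?, if_pos hc]
        rw [aStep_some_some h1 h2]
        apply houter
        apply PySem.Dict.ext
        rw [PySem.Dict.items_insert_of_contains _ _ (contains_of_get?_some h2)]
        have hcmem : c0 ∈ PySem.Set.ofList ((ps.filter (fun q => q.1 == w0)).map (fun q => q.2)) :=
          (mem_innerKeys ps w0 c0).mpr hc
        rw [innerOf_append_self, set_add_of_mem _ _ hcmem, innerOf_items, List.map_map, mk_items]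
        apply List.map_congr_left
        intro c hcm
        by_cases hcc : c = c0
        · subst hcc
          simp only [Function.comp_apply, beq_self_eq_true, if_pos]
          rw [count_append_self]
          push_cast
          ring_nf
        · simp only [Function.comp_apply]
          rw [if_neg (by simp [hcc]),
            count_append_ne ps w0 c0 w0 c (by simp [Prod.ext_iff, Ne.symm hcc])]
      · -- word present, category new: append to the inner dict
        have h2 : (innerOf ps w0).get? c0 = none := by rw [innerOf_get?, if_neg hc]
        rw [aStep_some_none h1 h2]
        apply houter
        apply PySem.Dict.ext
        rw [PySem.Dict.items_insert_of_not_contains _ _ (contains_of_get?_none h2)]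
        have hcmem : c0 ∉ PySem.Set.ofList ((ps.filter (fun q => q.1 == w0)).map (fun q => q.2)) :=
          fun h => hc ((mem_innerKeys ps w0 c0).mp h)
        rw [innerOf_append_self, set_add_of_not_mem _ _ hcmem, innerOf_items, mk_items,
          List.map_append, List.map_cons, List.map_nil]
        have hcnt0 : ps.count (w0, c0) = 0 := List.count_eq_zero.mpr hc
        congr 1
        · apply Eq.symm
          apply List.map_congr_left
          intro c hcm
          have hcc : c ≠ c0 := fun h => hcmem (h ▸ hcm)
          rw [count_append_ne ps w0 c0 w0 c (by simp [Prod.ext_iff, Ne.symm hcc])]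
        · rw [count_append_self, hcnt0]
          simp
    · -- new word: append a fresh singleton inner dict
      have h1 : (nestOf ps).get? w0 = none := by rw [nestOf_get?, if_neg hw]
      rw [aStep_none h1]
      apply PySem.Dict.ext
      rw [PySem.Dict.items_insert_of_not_contains _ _ (contains_of_get?_none h1)]
      unfold nestOf
      rw [hW', ofList_append_singleton,
        set_add_of_not_mem _ _ (fun h => hw ((PySem.Set.mem_ofList _ _).mp h)),
        mk_items, mk_items, List.map_append, List.map_cons, List.map_nil]
      congr 1
      · apply List.map_congr_left
        intro w hwmem
        have hww : w0 ≠ w := by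
          intro h; subst h; exact hw ((PySem.Set.mem_ofList _ _).mp hwmem)
        rw [innerOf_append_ne ps w0 c0 w hww]
      · have hfilter0 : ps.filter (fun q => q.1 == w0) = [] := by
          apply List.filter_eq_nil_iff.mpr
          rintro ⟨a, b⟩ hmem
          simp only [beq_iff_eq]
          intro h; subst h
          exact hw (List.mem_map.mpr ⟨(a, b), hmem, rfl⟩)
        have hcnt0 : ps.count (w0, c0) = 0 :=
          List.count_eq_zero.mpr (fun h => hw (List.mem_map.mpr ⟨(w0, c0), h, rfl⟩))
        rw [innerOf_append_self, hfilter0, List.map_nil, set_ofList_nil,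
          set_add_of_not_mem _ _ (List.not_mem_nil), List.nil_append,
          List.map_cons, List.map_nil, count_append_self, hcnt0]
        simp
        rfl

-- ===== VERDICT (by name: the statement is the Claim_ definition above) =====
theorem get_word_count_in_category_spec : Claim_equal_get_word_count_in_category := by
  intro documents categories _
  unfold Spec_get_word_count_in_category get_word_count_in_category get_word_count_in_category_alt
  have hflat :
      (documents.zip categories).foldl
        (fun d sc => (PySem.Str.split₀ sc.1).foldl (fun d w => aStep d w sc.2) d)
        PySem.Dict.empty
      = ((documents.zip categories).flatMap
          (fun sc => (PySem.Str.split₀ sc.1).map (fun w => (w, sc.2)))).foldl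
          (fun d p => aStep d p.1 p.2) PySem.Dict.empty := by
    rw [foldl_flatMap]
    simp [List.foldl_map]
  rw [hflat, char_aStep]
  simp [nestOf, innerOf, PySem.List.dedup_eq_ofList, List.map_map, Function.comp]
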